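-- pv_equiv track=rewrite | github.com/PilarczykM/Turing_Machine | ex_4.py | move_first_letter_to_end
-- ===== SOURCE A (Python) =====
-- def move_first_letter_to_end(input_text):
--     tape = list(input_text)
--     if len(tape) > 1:
--         first_letter = tape[0]
--         tape[0] = tape[1]
--
--         for i in range(1, len(tape) - 1):
--             tape[i] = tape[i + 1]
--
--         tape[-1] = first_letter
--
--     return ''.join(tape)
-- ===== SOURCE B (Python) =====
-- def move_first_letter_to_end(input_text):
--     return input_text[1:] + input_text[:1]
-- ===== Notes on version B (the rewrite author's own statement) =====
-- stated objective: simpler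
-- what changed: Replaces the list conversion, per-index shift loop and join with a single slice rotation s[1:] + s[:1].
import Mathlib
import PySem

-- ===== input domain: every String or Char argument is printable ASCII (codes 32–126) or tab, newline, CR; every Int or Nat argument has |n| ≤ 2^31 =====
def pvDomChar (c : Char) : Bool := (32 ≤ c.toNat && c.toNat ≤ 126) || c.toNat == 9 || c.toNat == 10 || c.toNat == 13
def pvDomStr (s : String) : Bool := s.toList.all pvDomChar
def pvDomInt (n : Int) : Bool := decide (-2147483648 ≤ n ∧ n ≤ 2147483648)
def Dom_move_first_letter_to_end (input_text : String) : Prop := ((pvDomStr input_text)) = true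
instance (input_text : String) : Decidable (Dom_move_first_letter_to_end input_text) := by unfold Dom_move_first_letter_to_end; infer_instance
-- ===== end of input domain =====

-- B replaces A's per-index shift loop over a char list with a single slice rotation s[1:] + s[:1] (simpler).


-- ===== PORT A =====
-- one step of A's loop body: tape[i] = tape[i + 1] (indices are in range wherever the loop runs,
-- so pyGetD's default is never used)
def pvShiftStep (u : List Char) (i : Int) : List Char :=
  u.set i.toNat (PySem.List.pyGetD u (i + 1) ' ')

def move_first_letter_to_end (input_text : String) : String :=
  let tape := input_text.toList
  if tape.length > 1 then
    let first_letter := PySem.List.pyGetD tape 0 ' '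
    let tape := tape.set 0 (PySem.List.pyGetD tape 1 ' ')
    let tape := (PySem.List.pyRange 1 ((tape.length : Int) - 1) 1).foldl pvShiftStep tape
    let tape := tape.set (tape.length - 1) first_letter   -- tape[-1] = first_letter
    String.ofList tape
  else
    String.ofList tape

-- ===== PORT B =====
def move_first_letter_to_end_alt (input_text : String) : String :=
  let l := input_text.toList
  String.ofList (PySem.List.slice l (some 1) none ++ PySem.List.slice l none (some 1))

-- ===== PRECONDITION & SPEC =====
def Spec_move_first_letter_to_end (input_text : String) (out : String) : Prop := out = move_first_letter_to_end_alt input_text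
instance (input_text : String) (out : String) : Decidable (Spec_move_first_letter_to_end input_text out) := by unfold Spec_move_first_letter_to_end; infer_instance

-- ===== CLAIM (what is proved, stated in full; the proofs are below) =====
def Claim_equal_move_first_letter_to_end : Prop := ∀ (input_text : String), Dom_move_first_letter_to_end input_text → Spec_move_first_letter_to_end input_text (move_first_letter_to_end input_text)

-- ===== LEMMAS AND PROOFS =====

-- A's loop, started at index s with s + 1 ≤ n, shifts every later element one slot left and
-- leaves the last element duplicated at the end.
theorem pv_shift_fold (k : Nat) : ∀ (t : List Char) (s : Nat), s + 1 ≤ t.length → t.length - 1 - s = k →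
    (PySem.List.pyRange (s : Int) ((t.length : Int) - 1) 1).foldl pvShiftStep t
      = t.take s ++ t.drop (s + 1) ++ [t.getD (t.length - 1) ' '] := by
  induction k with
  | zero =>
    intro t s hs hk
    have hse : s = t.length - 1 := by omega
    have hcast : ((s : Int)) = ((t.length : Int) - 1) := by omega
    rw [hcast, PySem.List.pyRange_one]
    simp only [sub_self, Int.toNat_zero, List.range_zero, List.map_nil, List.foldl_nil]
    subst hse
    have h1 : t.drop (t.length - 1 + 1) = [] := List.drop_eq_nil_of_le (by omega)
    rw [h1]
    have hlt : t.length - 1 < t.length := by omega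
    rw [List.getD_eq_getElem t ' ' hlt]
    rw [List.append_nil, List.take_append_getElem hlt, Nat.sub_add_cancel (by omega)]
    simp
  | succ k ih =>
    intro t s hs hk
    have hlt : (s : Int) < (t.length : Int) - 1 := by omega
    rw [PySem.List.pyRange_one_cons hlt, List.foldl_cons]
    have hs1 : s + 1 < t.length := by omega
    have hstep : pvShiftStep t (s : Int) = t.set s t[s + 1] := by
      unfold pvShiftStep
      have hc : ((s : Int) + 1) = ((s + 1 : Nat) : Int) := by push_cast; ring
      rw [hc, PySem.List.pyGetD_natCast]
      simp [List.getElem?_eq_getElem hs1]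
    rw [hstep]
    set t' := t.set s t[s + 1] with ht'
    have hlen : t'.length = t.length := by simp [ht']
    have ihres := ih t' (s + 1) (by rw [hlen]; omega) (by rw [hlen]; omega)
    rw [hlen] at ihres
    have hcast : ((s : Int) + 1) = (((s + 1 : Nat)) : Int) := by push_cast; ring
    rw [hcast, ihres]
    -- assemble: t'.take (s+1) = t.take s ++ [t[s+1]], t'.drop (s+2) = t.drop (s+2), last unchanged
    have h1 : t'.take (s + 1) = t.take s ++ [t[s + 1]] := by
      rw [ht', List.take_succ_eq_append_getElem (by rw [List.length_set]; omega)]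
      rw [List.getElem_set_self (by simp; omega)]
      rw [List.take_set, List.set_eq_of_length_le (by simp)]
    have h2 : t'.drop (s + 1 + 1) = t.drop (s + 1 + 1) := by
      rw [ht']; exact List.drop_set_of_lt (by omega)
    have h3 : t'.getD (t.length - 1) ' ' = t.getD (t.length - 1) ' ' := by
      rw [ht', List.getD_eq_getElem _ ' ' (by rw [List.length_set]; omega),
        List.getD_eq_getElem _ ' ' (by omega)]
      rw [List.getElem_set_ne (by omega)]
    rw [h1, h2, h3]
    have h4 : t.drop (s + 1) = t[s + 1] :: t.drop (s + 1 + 1) := List.drop_eq_getElem_cons hs1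
    rw [h4]
    simp

-- setting the last element of xs ++ [c]
theorem pv_set_last {α : Type} (xs : List α) (c a : α) :
    (xs ++ [c]).set xs.length a = xs ++ [a] := by
  induction xs with
  | nil => simp
  | cons x xs ih => simp [ih]

theorem pv_main (l : List Char) :
    move_first_letter_to_end (String.ofList l) = move_first_letter_to_end_alt (String.ofList l) := by
  unfold move_first_letter_to_end move_first_letter_to_end_alt
  simp only [String.toList_ofList]
  rw [PySem.List.slice_from_one]
  rw [PySem.List.slice_to _ (by norm_num : (0:Int) ≤ 1)]
  match l with
  | [] => simp
  | [a] => simp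
  | a :: b :: rest =>
    have hlen : (a :: b :: rest).length > 1 := by simp
    rw [if_pos hlen]
    have hset0 : (a :: b :: rest).set 0 (PySem.List.pyGetD (a :: b :: rest) 1 ' ') = b :: b :: rest := by
      simp [PySem.List.pyGetD]
    simp only [hset0]
    have hfirst : PySem.List.pyGetD (a :: b :: rest) 0 ' ' = a := by simp [PySem.List.pyGetD]
    rw [hfirst]
    have hfold := pv_shift_fold (rest.length) (b :: b :: rest) 1 (by simp) (by simp)
    simp only [List.length_cons, Nat.cast_one, Nat.cast_add] at hfold ⊢
    push_cast at hfold ⊢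
    rw [hfold]
    have hr : (b :: b :: rest).take 1 ++ (b :: b :: rest).drop 2 ++ [(b :: b :: rest).getD (rest.length + 1) ' ']
        = (b :: rest) ++ [(b :: rest).getD rest.length ' '] := by
      simp only [List.take_succ_cons, List.take_zero, List.drop_succ_cons, List.drop_zero,
        List.getD_eq_getElem?_getD, List.getElem?_cons_succ]
      rfl
    rw [hr]
    have hlast : ((b :: rest) ++ [(b :: rest).getD rest.length ' ']).set
        (((b :: rest) ++ [(b :: rest).getD rest.length ' ']).length - 1) a
        = (b :: rest) ++ [a] := by
      have he : ((b :: rest) ++ [(b :: rest).getD rest.length ' ']).length - 1 = (b :: rest).length := by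
        simp
      rw [he, pv_set_last]
    rw [hlast]
    simp

-- ===== VERDICT (by name: the statement is the Claim_ definition above) =====
theorem move_first_letter_to_end_spec : Claim_equal_move_first_letter_to_end := by
  intro s _
  unfold Spec_move_first_letter_to_end
  have h := pv_main s.toList
  simpa using h
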